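-- pv_equiv track=rewrite | github.com/SimChid/comp-333-hw5 | unit_testing_py_test.py | string_capitalizer
-- ===== SOURCE A (Python) =====
-- def string_capitalizer(tobecapitalized):
--     if tobecapitalized == "":
--         return tobecapitalized
--     i = 0
--     try:
--         tbclist = [*tobecapitalized]
--         while i < (len(tbclist)):
--             if i == 0 or i == (len(tbclist) - 1):
--                 tbclist[i] = tbclist[i].upper()
--             i = i + 1
--         tobecapitalized = ''.join(tbclist)
--         return tobecapitalized
--     except:
--         # If failure, return the input as is.
--         return tobecapitalized
-- ===== SOURCE B (Python) =====
-- def string_capitalizer(tobecapitalized):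
--     if len(tobecapitalized) <= 1:
--         return tobecapitalized.upper()
--     return (tobecapitalized[0].upper()
--             + tobecapitalized[1:-1]
--             + tobecapitalized[-1].upper())
-- ===== Notes on version B (the rewrite author's own statement) =====
-- stated objective: simpler
-- what changed: Replaces the index-scanning while loop over a char list (with per-index boundary tests, in-place assignment and join) by direct slicing: upper(first) + middle slice + upper(last), with a single guard for strings of length <= 1.
import Mathlib
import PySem

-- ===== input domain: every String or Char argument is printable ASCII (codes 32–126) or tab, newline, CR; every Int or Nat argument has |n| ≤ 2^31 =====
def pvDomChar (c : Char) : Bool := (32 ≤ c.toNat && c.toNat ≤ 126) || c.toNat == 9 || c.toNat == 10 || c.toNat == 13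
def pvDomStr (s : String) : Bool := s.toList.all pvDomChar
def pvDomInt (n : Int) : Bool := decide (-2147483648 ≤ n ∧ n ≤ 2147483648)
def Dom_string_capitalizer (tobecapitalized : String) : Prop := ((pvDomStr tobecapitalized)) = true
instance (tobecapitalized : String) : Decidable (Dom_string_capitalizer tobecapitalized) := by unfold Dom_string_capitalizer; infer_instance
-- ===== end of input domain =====

-- B uppercases the first and last characters by slicing instead of A's index-scanning loop (objective: simpler).

-- ===== PORT A =====
-- A's while loop: scan i over the char list, uppercasing positions 0 and len-1.
def pvCapLoopA (l : List Char) (i : Nat) : List Char :=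
  if _h : i < l.length then
    let l' := if i = 0 ∨ i = l.length - 1
      then l.set i (PySem.Chars.upperChar (l.getD i ' '))
      else l
    pvCapLoopA l' (i + 1)
  else l
termination_by l.length - i
decreasing_by
  have hlen : l'.length = l.length := by
    simp only [l']; split <;> simp
  rw [hlen]; omega

def string_capitalizer (tobecapitalized : String) : String :=
  if tobecapitalized == "" then tobecapitalized
  else String.ofList (pvCapLoopA tobecapitalized.toList 0)

-- ===== PORT B =====
def string_capitalizer_alt (tobecapitalized : String) : String :=
  if PySem.Str.len tobecapitalized ≤ 1 then PySem.Str.upper tobecapitalized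
  else
    let cs := tobecapitalized.toList
    let first := (PySem.List.pyGet? cs 0).getD ' '      -- s[0], in range by the guard
    let last  := (PySem.List.pyGet? cs (-1)).getD ' '   -- s[-1], in range by the guard
    String.ofList ([PySem.Chars.upperChar first]
      ++ PySem.List.slice cs (some 1) (some (-1))       -- s[1:-1]
      ++ [PySem.Chars.upperChar last])

-- ===== PRECONDITION & SPEC =====
def Spec_string_capitalizer (tobecapitalized : String) (out : String) : Prop := out = string_capitalizer_alt tobecapitalized
instance (tobecapitalized : String) (out : String) : Decidable (Spec_string_capitalizer tobecapitalized out) := by unfold Spec_string_capitalizer; infer_instance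

-- ===== CLAIM (what is proved, stated in full; the proofs are below) =====
def Claim_equal_string_capitalizer : Prop := ∀ (tobecapitalized : String), Dom_string_capitalizer tobecapitalized → Spec_string_capitalizer tobecapitalized (string_capitalizer tobecapitalized)

-- ===== LEMMAS AND PROOFS =====

-- After the first step (i ≥ 1), A's loop only changes the last position.
lemma pvCapLoopA_aux (n : Nat) : ∀ (l : List Char) (i : Nat), l.length - i ≤ n → 1 ≤ i →
    pvCapLoopA l i =
      if i < l.length
      then l.set (l.length - 1) (PySem.Chars.upperChar (l.getD (l.length - 1) ' '))
      else l := by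
  induction n with
  | zero =>
    intro l i hle h1
    have hni : ¬ i < l.length := by omega
    rw [pvCapLoopA]
    simp [hni]
  | succ n ih =>
    intro l i hle h1
    rw [pvCapLoopA]
    by_cases h : i < l.length
    · have h0 : ¬ i = 0 := by omega
      by_cases hl : i = l.length - 1
      · have hcond : (i = 0 ∨ i = l.length - 1) := Or.inr hl
        simp only [dif_pos h, if_pos hcond]
        set l' := l.set i (PySem.Chars.upperChar (l.getD i ' ')) with hl'
        have hlen : l'.length = l.length := by simp [hl']
        rw [ih l' (i+1) (by omega) (by omega)]
        rw [if_neg (by omega : ¬ (i + 1 < l'.length)), if_pos h, hl']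
        rw [← hl]
      · have hcond : ¬ (i = 0 ∨ i = l.length - 1) := by tauto
        simp only [dif_pos h, if_neg hcond]
        rw [ih l (i+1) (by omega) (by omega)]
        have : (i+1) < l.length := by omega
        simp [this, h]
    · rw [pvCapLoopA]
      simp [h]

-- s[1:-1] is tail-then-dropLast.
lemma slice_one_neg_one (xs : List Char) :
    PySem.List.slice xs (some 1) (some (-1)) = xs.tail.dropLast := by
  simp [PySem.List.slice]
  rcases xs with _ | ⟨c, rest⟩
  · simp
  · simp [List.dropLast_eq_take]

theorem string_capitalizer_spec : Claim_equal_string_capitalizer := by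
  intro s _
  unfold Spec_string_capitalizer string_capitalizer string_capitalizer_alt
  rcases hcs : s.toList with _ | ⟨c, rest⟩
  · -- empty string
    have hs : s = "" := by
      have := congrArg String.ofList hcs
      simpa using this
    subst hs
    simp [PySem.Str.len, PySem.Str.upper, PySem.Chars.upper]
  · have hne : ¬ (s == "") := by
      intro hb
      have : s = "" := by simpa using hb
      subst this; simp at hcs
    rw [if_neg (by simpa using hne)]
    have hlen : PySem.Str.len s = ((c :: rest).length : Int) := by
      rw [PySem.Str.len_eq, hcs]
    rcases hrest : rest with _ | ⟨d, tl⟩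
    · -- single character
      subst hrest
      rw [if_pos (by rw [hlen]; simp)]
      rw [pvCapLoopA]
      norm_num
      rw [pvCapLoopA]
      simp [PySem.Str.upper, PySem.Chars.upper, hcs]
    · -- length ≥ 2
      rw [if_neg (by rw [hlen]; simp [hrest])]
      -- A side: first step sets index 0, then the aux lemma handles the rest
      rw [pvCapLoopA]
      rw [dif_pos (by simp : 0 < (c :: d :: tl).length)]
      norm_num
      rw [pvCapLoopA_aux ((d :: tl).length) _ 1 (by simp) (le_refl 1)]
      rw [if_pos (by simp)]
      -- both sides as explicit lists: split off the last element
      rcases List.eq_nil_or_concat (d :: tl) with hco | ⟨ys, z, hco⟩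
      · simp at hco
      · rw [hco]
        simp [PySem.List.pyGet?, PySem.List.pyIdx?, slice_one_neg_one, List.getD]
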